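-- pv_equiv track=rewrite | github.com/OlgaBondareva/COSII | lab2/geometric_features.py | elongation
-- ===== SOURCE A (Python) =====
-- def elongation(labels, labels_array):
--     elongations = dict.fromkeys(labels_array)
--     for key in elongations:
--         elongations.update({key: [len(labels), 0, len(labels[0]), 0]})
--     for x in range(len(labels)):
--         for y in range(len(labels[x])):
--             if labels[x][y] != 0:
--                 val = elongations.get(labels[x][y])
--                 if x < elongations.get(labels[x][y])[0]:
--                     val[0] = x
--                     elongations.update({labels[x][y]: val})
--                 if x > elongations.get(labels[x][y])[1]:
--                     val[1] = x
--                     elongations.update({labels[x][y]: val})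
--                 if y < elongations.get(labels[x][y])[2]:
--                     val[2] = y
--                     elongations.update({labels[x][y]: val})
--                 if y > elongations.get(labels[x][y])[3]:
--                     val[3] = y
--                     elongations.update({labels[x][y]: val})
--
--     new_elongations = dict.fromkeys(labels_array, [0, 0])
--     for key in elongations:
--         dx = elongations.get(key)[1] - elongations.get(key)[0]
--         dy = elongations.get(key)[3] - elongations.get(key)[2]
--         new_elongations.update({key: [dx, dy]})
--     return new_elongations
-- ===== SOURCE B (Python) =====
-- def elongation(labels, labels_array):
--     # Gather-then-reduce: collect each requested label's coordinates in one pass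
--     # over the grid, then reduce each coordinate list with max/min seeded by the
--     # sentinels len(labels)/0/len(labels[0])/0 (so labels with no pixels and
--     # label 0 keep the negative extents).
--     pts = {k: [] for k in labels_array}
--     for x, row in enumerate(labels):
--         for y, v in enumerate(row):
--             if v != 0:
--                 pts[v].append((x, y))
--     if not pts:
--         return {}
--     h, w = len(labels), len(labels[0])
--     result = {}
--     for k, cs in pts.items():
--         xs = [x for x, _ in cs]
--         ys = [y for _, y in cs]
--         result[k] = [max([0] + xs) - min([h] + xs),
--                      max([0] + ys) - min([w] + ys)]
--     return result
-- ===== Notes on version B (the rewrite author's own statement) =====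
-- stated objective: simpler
-- what changed: Replaces A's four interleaved conditional min/max updates on a mutable per-key 4-list (with a second rebuild loop over the dict) by a gather-then-reduce shape: one pass groups each nonzero label's coordinates into a dict of lists, then each distinct requested label's extents are plain max/min over its coordinate list seeded with the sentinels len(labels), 0, len(labels[0]), 0.
import Mathlib
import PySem

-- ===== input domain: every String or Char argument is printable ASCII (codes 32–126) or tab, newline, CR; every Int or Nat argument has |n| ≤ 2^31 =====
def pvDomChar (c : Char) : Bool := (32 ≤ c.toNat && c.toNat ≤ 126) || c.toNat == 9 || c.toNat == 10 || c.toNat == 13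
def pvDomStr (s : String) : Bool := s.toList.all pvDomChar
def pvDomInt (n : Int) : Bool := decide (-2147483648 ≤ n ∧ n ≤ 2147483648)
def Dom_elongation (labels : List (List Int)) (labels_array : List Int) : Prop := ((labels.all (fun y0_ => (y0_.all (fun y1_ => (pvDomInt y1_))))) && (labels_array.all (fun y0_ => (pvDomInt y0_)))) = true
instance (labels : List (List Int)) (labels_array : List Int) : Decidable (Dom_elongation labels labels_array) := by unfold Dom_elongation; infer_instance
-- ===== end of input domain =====

-- B replaces A's in-place conditional min/max updates by a gather-then-reduce pass (same cost, simpler shape).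


-- ===== PORT A =====
-- A's per-key 4-element list [minX, maxX, minY, maxY] (mutated index by index) is ported as a 4-tuple;
-- the four sequential conditional updates touch distinct indices, so they are the four updates below.
def pvUpd (val : Int × Int × Int × Int) (x y : Int) : Int × Int × Int × Int :=
  let v0 := if x < val.1 then x else val.1
  let v1 := if x > val.2.1 then x else val.2.1
  let v2 := if y < val.2.2.1 then y else val.2.2.1
  let v3 := if y > val.2.2.2 then y else val.2.2.2
  (v0, v1, v2, v3)

def elongation (labels : List (List Int)) (labels_array : List Int) : List (Int × List Int) :=
  let h : Int := labels.length
  -- len(labels[0]): the IndexError when labels = [] (reached only when labels_array ≠ []) is excluded by Pre_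
  let w : Int := match labels with | [] => 0 | r :: _ => r.length
  -- elongations = dict.fromkeys(labels_array); for key in elongations: elongations[key] = [h, 0, w, 0]
  let e0 : PySem.Dict Int (Int × Int × Int × Int) :=
    labels_array.foldl (fun d k => d.insert k (h, 0, w, 0)) PySem.Dict.empty
  -- for x in range(len(labels)): for y in range(len(labels[x])): … — ported as enumeration (same cells, same order)
  let e1 : PySem.Dict Int (Int × Int × Int × Int) :=
    (PySem.List.enumerate labels).foldl (fun d (p : Int × List Int) =>
      (PySem.List.enumerate p.2).foldl (fun d (q : Int × Int) =>
        if q.2 ≠ 0 then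
          match d.get? q.2 with
          | some val => d.insert q.2 (pvUpd val p.1 q.1)
          | none => d      -- Python: elongations.get(...) is None, None[0] raises TypeError; excluded by Pre_
        else d) d) e0
  -- new_elongations = dict.fromkeys(labels_array, [0, 0]); then the dx/dy loop over elongations' keys
  let n0 : PySem.Dict Int (List Int) :=
    labels_array.foldl (fun d k => d.insert k [0, 0]) PySem.Dict.empty
  let n1 : PySem.Dict Int (List Int) :=
    e1.keys.foldl (fun d k =>
      match e1.get? k with
      | some val => d.insert k [val.2.1 - val.1, val.2.2.2 - val.2.2.1]
      | none => d) n0      -- unreachable: k is a key of e1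
  n1.items

-- ===== PORT B =====
def elongation_alt (labels : List (List Int)) (labels_array : List Int) : List (Int × List Int) :=
  -- pts = {k: [] for k in labels_array}
  let pts0 : PySem.Dict Int (List (Int × Int)) :=
    labels_array.foldl (fun d k => d.insert k []) PySem.Dict.empty
  -- one pass over the grid: pts[v].append((x, y)) for each nonzero v
  let pts : PySem.Dict Int (List (Int × Int)) :=
    (PySem.List.enumerate labels).foldl (fun d (p : Int × List Int) =>
      (PySem.List.enumerate p.2).foldl (fun d (q : Int × Int) =>
        if q.2 ≠ 0 then
          match d.get? q.2 with
          | some cs => d.insert q.2 (cs ++ [(p.1, q.1)])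
          | none => d      -- Python: pts[v] raises KeyError; excluded by Pre_
        else d) d) pts0
  if pts.items.isEmpty then []
  else
    let h : Int := labels.length
    let w : Int := match labels with | [] => 0 | r :: _ => r.length
    pts.items.foldl (fun r kv =>
      let xs := kv.2.map (·.1)
      let ys := kv.2.map (·.2)
      r.insert kv.1 [((PySem.List.max? ((0 : Int) :: xs) (fun a => a)).getD 0)
                       - ((PySem.List.min? (h :: xs) (fun a => a)).getD 0),
                     ((PySem.List.max? ((0 : Int) :: ys) (fun a => a)).getD 0)
                       - ((PySem.List.min? (w :: ys) (fun a => a)).getD 0)])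
      (PySem.Dict.empty : PySem.Dict Int (List Int)) |>.items

-- ===== PRECONDITION & SPEC =====
-- Pre_ excludes exactly the inputs where the Python A raises: labels_array non-empty with an empty grid
-- (IndexError on labels[0]) and grids containing a nonzero label absent from labels_array (TypeError on None[0]);
-- Python B raises on exactly the same inputs (IndexError / KeyError).
def Pre_elongation (labels : List (List Int)) (labels_array : List Int) : Prop :=
  (labels_array ≠ [] → labels ≠ []) ∧
  ∀ row ∈ labels, ∀ v ∈ row, v ≠ 0 → v ∈ labels_array
instance (labels : List (List Int)) (labels_array : List Int) : Decidable (Pre_elongation labels labels_array) := by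
  unfold Pre_elongation; infer_instance
def pvWitness_elongation : List (List Int) × List Int := ([[1, 0], [0, 2]], [1, 2])

def Spec_elongation (labels : List (List Int)) (labels_array : List Int) (out : List (Int × List Int)) : Prop := out = elongation_alt labels labels_array
instance (labels : List (List Int)) (labels_array : List Int) (out : List (Int × List Int)) : Decidable (Spec_elongation labels labels_array out) := by unfold Spec_elongation; infer_instance

-- ===== CLAIM (what is proved, stated in full; the proofs are below) =====
def Claim_equal_elongation : Prop := ∀ (labels : List (List Int)) (labels_array : List Int), Dom_elongation labels labels_array → Pre_elongation labels labels_array → Spec_elongation labels labels_array (elongation labels labels_array)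

-- ===== LEMMAS AND PROOFS =====

-- The flattened cell list (value, x, y) that both nested loops traverse, in traversal order.
def pvCells (labels : List (List Int)) : List (Int × Int × Int) :=
  (PySem.List.enumerate labels).flatMap (fun p => (PySem.List.enumerate p.2).map (fun q => (q.2, p.1, q.1)))

lemma pv_foldl_flat {σ : Type} (labels : List (List Int)) (f : σ → Int × Int × Int → σ) (s : σ) :
    (PySem.List.enumerate labels).foldl (fun d p =>
      (PySem.List.enumerate p.2).foldl (fun d q => f d (q.2, p.1, q.1)) d) s
    = (pvCells labels).foldl f s := by
  rw [pvCells, List.foldl_flatMap]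
  simp [List.foldl_map]

-- A's grid-loop step, on one flattened cell.
def pvStepA (d : PySem.Dict Int (Int × Int × Int × Int)) (c : Int × Int × Int) :
    PySem.Dict Int (Int × Int × Int × Int) :=
  if c.1 ≠ 0 then
    match d.get? c.1 with
    | some val => d.insert c.1 (pvUpd val c.2.1 c.2.2)
    | none => d
  else d

-- B's gather step, on one flattened cell.
def pvStepG (d : PySem.Dict Int (List (Int × Int))) (c : Int × Int × Int) :
    PySem.Dict Int (List (Int × Int)) :=
  if c.1 ≠ 0 then
    match d.get? c.1 with
    | some cs => d.insert c.1 (cs ++ [c.2])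
    | none => d
  else d

-- the (x, y) cells carrying the (nonzero) label k, in traversal order
def pvPtsFor (k : Int) (cs : List (Int × Int × Int)) : List (Int × Int) :=
  ((cs.filter (fun c => decide (c.1 ≠ 0))).filter (fun c => c.1 == k)).map (·.2)

lemma pvStepA_keys (cs : List (Int × Int × Int)) (d : PySem.Dict Int (Int × Int × Int × Int)) :
    (cs.foldl pvStepA d).keys = d.keys := by
  induction cs generalizing d with
  | nil => rfl
  | cons c cs ih =>
    rw [List.foldl_cons, ih]
    unfold pvStepA
    split
    · cases hg : d.get? c.1 with
      | none => simp
      | some val =>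
        simp only []
        apply PySem.Dict.keys_insert_of_contains
        rw [PySem.Dict.contains_eq_isSome_get?, hg]; rfl
    · rfl

lemma pvStepA_get (cs : List (Int × Int × Int)) (d : PySem.Dict Int (Int × Int × Int × Int)) (k : Int) :
    (cs.foldl pvStepA d).get? k
      = (d.get? k).map (fun s => (pvPtsFor k cs).foldl (fun s p => pvUpd s p.1 p.2) s) := by
  induction cs generalizing d with
  | nil => simp [pvPtsFor]
  | cons c cs ih =>
    rw [List.foldl_cons, ih]
    by_cases h0 : c.1 = 0
    · simp [pvStepA, h0, pvPtsFor]
    · by_cases hk : c.1 = k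
      · subst hk
        cases hg : d.get? c.1 with
        | none => simp [pvStepA, h0, hg, pvPtsFor]
        | some val =>
          simp [pvStepA, h0, hg, pvPtsFor, PySem.Dict.get?_insert_self]
      · cases hg : d.get? c.1 with
        | none => simp [pvStepA, h0, hg, pvPtsFor, hk]
        | some val =>
          simp [pvStepA, h0, hg, pvPtsFor, hk,
            PySem.Dict.get?_insert_of_ne d (pvUpd val c.2.1 c.2.2) (Ne.symm hk)]

lemma pvStepG_keys (cs : List (Int × Int × Int)) (d : PySem.Dict Int (List (Int × Int))) :
    (cs.foldl pvStepG d).keys = d.keys := by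
  induction cs generalizing d with
  | nil => rfl
  | cons c cs ih =>
    rw [List.foldl_cons, ih]
    unfold pvStepG
    split
    · cases hg : d.get? c.1 with
      | none => simp
      | some cs0 =>
        simp only []
        apply PySem.Dict.keys_insert_of_contains
        rw [PySem.Dict.contains_eq_isSome_get?, hg]; rfl
    · rfl

lemma pvStepG_get (cs : List (Int × Int × Int)) (d : PySem.Dict Int (List (Int × Int))) (k : Int) :
    (cs.foldl pvStepG d).get? k
      = (d.get? k).map (fun s => (pvPtsFor k cs).foldl (fun cs0 p => cs0 ++ [p]) s) := by
  induction cs generalizing d with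
  | nil => simp [pvPtsFor]
  | cons c cs ih =>
    rw [List.foldl_cons, ih]
    by_cases h0 : c.1 = 0
    · simp [pvStepG, h0, pvPtsFor]
    · by_cases hk : c.1 = k
      · subst hk
        cases hg : d.get? c.1 with
        | none => simp [pvStepG, h0, hg, pvPtsFor]
        | some cs0 =>
          simp [pvStepG, h0, hg, pvPtsFor, PySem.Dict.get?_insert_self]
      · cases hg : d.get? c.1 with
        | none => simp [pvStepG, h0, hg, pvPtsFor, hk]
        | some cs0 =>
          simp [pvStepG, h0, hg, pvPtsFor, hk,
            PySem.Dict.get?_insert_of_ne d (cs0 ++ [c.2]) (Ne.symm hk)]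

lemma pv_if_lt (x a : Int) : (if x < a then x else a) = min a x := by
  rw [min_def]; split_ifs <;> omega

lemma pv_if_gt (x b : Int) : (if x > b then x else b) = max b x := by
  rw [max_def]; split_ifs <;> omega

lemma pv_upd_fold (ps : List (Int × Int)) (a b c e : Int) :
    ps.foldl (fun s p => pvUpd s p.1 p.2) (a, b, c, e)
      = (ps.foldl (fun m p => min m p.1) a, ps.foldl (fun m p => max m p.1) b,
         ps.foldl (fun m p => min m p.2) c, ps.foldl (fun m p => max m p.2) e) := by
  induction ps generalizing a b c e with
  | nil => rfl
  | cons p ps ih =>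
    have hstep : pvUpd (a, b, c, e) p.1 p.2 = (min a p.1, max b p.1, min c p.2, max e p.2) := by
      simp only [pvUpd, pv_if_lt, pv_if_gt]
    rw [List.foldl_cons, hstep]
    exact ih _ _ _ _

-- a fold of plain inserts whose value depends only on the key, per key
lemma pv_insFold_get {ν : Type} (L : List Int) (g : Int → ν) (d : PySem.Dict Int ν) (j : Int) :
    (L.foldl (fun d k => d.insert k (g k)) d).get? j
      = if j ∈ L then some (g j) else d.get? j := by
  induction L generalizing d with
  | nil => simp
  | cons k tl ih =>
    rw [List.foldl_cons, ih]
    by_cases hj : j ∈ tl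
    · simp [hj]
    · by_cases hk : j = k
      · subst hk; simp [hj, PySem.Dict.get?_insert_self]
      · simp [hj, hk, PySem.Dict.get?_insert_of_ne d (g k) hk]

lemma pv_set_add_mem (s : List Int) (x : Int) (h : x ∈ s) : PySem.Set.add s x = s := by
  simp [PySem.Set.add, PySem.Set.contains, h]

lemma pv_set_update_of_subset (l s : List Int) (h : ∀ x ∈ l, x ∈ s) : PySem.Set.update s l = s := by
  induction l generalizing s with
  | nil => rfl
  | cons x tl ih =>
    have hstep : PySem.Set.update s (x :: tl) = PySem.Set.update (PySem.Set.add s x) tl := rfl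
    rw [hstep, pv_set_add_mem s x (h x (by simp))]
    exact ih s (fun y hy => h y (by simp [hy]))

-- named copies of the ports' intermediate expressions (definitionally equal to the ports' lets)
def pvSentinel (labels : List (List Int)) : Int × Int × Int × Int :=
  ((labels.length : Int), 0, (match labels with | [] => (0 : Int) | r :: _ => (r.length : Int)), 0)

def pvE0 (labels : List (List Int)) (labels_array : List Int) :
    PySem.Dict Int (Int × Int × Int × Int) :=
  labels_array.foldl (fun d k => d.insert k (pvSentinel labels)) PySem.Dict.empty

def pvE1 (labels : List (List Int)) (labels_array : List Int) :
    PySem.Dict Int (Int × Int × Int × Int) :=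
  (PySem.List.enumerate labels).foldl (fun d (p : Int × List Int) =>
    (PySem.List.enumerate p.2).foldl (fun d (q : Int × Int) =>
      if q.2 ≠ 0 then
        match d.get? q.2 with
        | some val => d.insert q.2 (pvUpd val p.1 q.1)
        | none => d
      else d) d) (pvE0 labels labels_array)

def pvN0 (labels_array : List Int) : PySem.Dict Int (List Int) :=
  labels_array.foldl (fun d k => d.insert k [0, 0]) PySem.Dict.empty

def pvN1 (labels : List (List Int)) (labels_array : List Int) : PySem.Dict Int (List Int) :=
  (pvE1 labels labels_array).keys.foldl (fun d k =>
    match (pvE1 labels labels_array).get? k with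
    | some val => d.insert k [val.2.1 - val.1, val.2.2.2 - val.2.2.1]
    | none => d) (pvN0 labels_array)

def pvG0 (labels_array : List Int) : PySem.Dict Int (List (Int × Int)) :=
  labels_array.foldl (fun d k => d.insert k []) PySem.Dict.empty

def pvG1 (labels : List (List Int)) (labels_array : List Int) :
    PySem.Dict Int (List (Int × Int)) :=
  (PySem.List.enumerate labels).foldl (fun d (p : Int × List Int) =>
    (PySem.List.enumerate p.2).foldl (fun d (q : Int × Int) =>
      if q.2 ≠ 0 then
        match d.get? q.2 with
        | some cs => d.insert q.2 (cs ++ [(p.1, q.1)])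
        | none => d
      else d) d) (pvG0 labels_array)

def pvVB (labels : List (List Int)) (kv : Int × List (Int × Int)) : List Int :=
  let xs := kv.2.map (·.1)
  let ys := kv.2.map (·.2)
  [((PySem.List.max? ((0 : Int) :: xs) (fun a => a)).getD 0)
     - ((PySem.List.min? (((labels.length : Int)) :: xs) (fun a => a)).getD 0),
   ((PySem.List.max? ((0 : Int) :: ys) (fun a => a)).getD 0)
     - ((PySem.List.min? ((match labels with | [] => (0 : Int) | r :: _ => (r.length : Int)) :: ys) (fun a => a)).getD 0)]

def pvFA (labels : List (List Int)) (k : Int) : List Int :=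
  let s := (pvPtsFor k (pvCells labels)).foldl (fun s p => pvUpd s p.1 p.2) (pvSentinel labels)
  [s.2.1 - s.1, s.2.2.2 - s.2.2.1]

lemma pvA_shape (labels : List (List Int)) (labels_array : List Int) :
    elongation labels labels_array = (pvN1 labels labels_array).items := rfl

lemma pvB_shape (labels : List (List Int)) (labels_array : List Int) :
    elongation_alt labels labels_array
      = if (pvG1 labels labels_array).items.isEmpty then []
        else ((pvG1 labels labels_array).items.foldl
            (fun r kv => r.insert kv.1 (pvVB labels kv))
            (PySem.Dict.empty : PySem.Dict Int (List Int))).items := rfl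

lemma pvE1_flat (labels : List (List Int)) (labels_array : List Int) :
    pvE1 labels labels_array
      = (pvCells labels).foldl pvStepA (pvE0 labels labels_array) :=
  pv_foldl_flat labels pvStepA (pvE0 labels labels_array)

lemma pvG1_flat (labels : List (List Int)) (labels_array : List Int) :
    pvG1 labels labels_array
      = (pvCells labels).foldl pvStepG (pvG0 labels_array) :=
  pv_foldl_flat labels pvStepG (pvG0 labels_array)

lemma pvE0_get (labels : List (List Int)) (labels_array : List Int) (j : Int) :
    (pvE0 labels labels_array).get? j
      = if j ∈ labels_array then some (pvSentinel labels) else none := by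
  have h := pv_insFold_get labels_array (fun _ => pvSentinel labels) PySem.Dict.empty j
  simpa using h

lemma pvE0_keys (labels : List (List Int)) (labels_array : List Int) :
    (pvE0 labels labels_array).keys = PySem.Set.ofList labels_array := by
  have h := PySem.Dict.keys_foldl_insert labels_array (fun _ _ => pvSentinel labels)
    PySem.Dict.empty
  simpa [PySem.Set.update, PySem.Set.ofList_eq_foldl] using h

lemma pvE1_keys (labels : List (List Int)) (labels_array : List Int) :
    (pvE1 labels labels_array).keys = PySem.Set.ofList labels_array := by
  rw [pvE1_flat, pvStepA_keys, pvE0_keys]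

lemma pvE1_get (labels : List (List Int)) (labels_array : List Int) (j : Int)
    (hj : j ∈ labels_array) :
    (pvE1 labels labels_array).get? j
      = some ((pvPtsFor j (pvCells labels)).foldl (fun s p => pvUpd s p.1 p.2) (pvSentinel labels)) := by
  rw [pvE1_flat, pvStepA_get, pvE0_get]
  simp [hj]

lemma pvG0_get (labels_array : List Int) (j : Int) :
    (pvG0 labels_array).get? j
      = if j ∈ labels_array then some ([] : List (Int × Int)) else none := by
  have h := pv_insFold_get labels_array (fun _ => ([] : List (Int × Int))) PySem.Dict.empty j
  simpa using h

lemma pvG0_keys (labels_array : List Int) :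
    (pvG0 labels_array).keys = PySem.Set.ofList labels_array := by
  have h := PySem.Dict.keys_foldl_insert labels_array (fun _ _ => ([] : List (Int × Int)))
    PySem.Dict.empty
  simpa [PySem.Set.update, PySem.Set.ofList_eq_foldl] using h

lemma pvG1_keys (labels : List (List Int)) (labels_array : List Int) :
    (pvG1 labels labels_array).keys = PySem.Set.ofList labels_array := by
  rw [pvG1_flat, pvStepG_keys, pvG0_keys]

lemma pvG1_get (labels : List (List Int)) (labels_array : List Int) (j : Int)
    (hj : j ∈ labels_array) :
    (pvG1 labels labels_array).get? j = some (pvPtsFor j (pvCells labels)) := by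
  rw [pvG1_flat, pvStepG_get, pvG0_get, if_pos hj, Option.map_some,
    PySem.List.foldl_append_singleton_eq_self]
  rw [List.nil_append]

lemma pvG1_items (labels : List (List Int)) (labels_array : List Int) :
    (pvG1 labels labels_array).items
      = (PySem.Set.ofList labels_array).map (fun k => (k, pvPtsFor k (pvCells labels))) := by
  have hnodup : (pvG1 labels labels_array).keys.Nodup := by
    rw [pvG1_keys]; exact PySem.Set.nodup_ofList _
  rw [PySem.Dict.items_eq_map_keys _ hnodup [], pvG1_keys]
  apply List.map_congr_left
  intro k hk
  have hk' : k ∈ labels_array := (PySem.Set.mem_ofList _ _).mp hk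
  rw [PySem.Dict.getD_eq_get?_getD, pvG1_get labels labels_array k hk']
  rfl

lemma pvN1_eq_insFold (labels : List (List Int)) (labels_array : List Int) :
    pvN1 labels labels_array
      = (pvE1 labels labels_array).keys.foldl (fun d k => d.insert k (pvFA labels k))
          (pvN0 labels_array) := by
  unfold pvN1
  apply PySem.List.foldl_congr_mem
  intro acc x hx
  have hx' : x ∈ labels_array := by
    rw [pvE1_keys] at hx
    exact (PySem.Set.mem_ofList _ _).mp hx
  rw [pvE1_get labels labels_array x hx']
  rfl

lemma pvN0_keys (labels_array : List Int) :
    (pvN0 labels_array).keys = PySem.Set.ofList labels_array := by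
  have h := PySem.Dict.keys_foldl_insert labels_array (fun _ _ => ([0, 0] : List Int))
    PySem.Dict.empty
  simpa [PySem.Set.update, PySem.Set.ofList_eq_foldl] using h

lemma pvA_items (labels : List (List Int)) (labels_array : List Int) :
    elongation labels labels_array
      = (PySem.Set.ofList labels_array).map (fun k => (k, pvFA labels k)) := by
  rw [pvA_shape]
  have hkeys : (pvN1 labels labels_array).keys = PySem.Set.ofList labels_array := by
    rw [pvN1_eq_insFold]
    have h := PySem.Dict.keys_foldl_insert (pvE1 labels labels_array).keys
      (fun _ k => pvFA labels k) (pvN0 labels_array)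
    rw [h, pvN0_keys, pvE1_keys]
    exact pv_set_update_of_subset _ _ (fun x hx => hx)
  have hnodup : (pvN1 labels labels_array).keys.Nodup := by
    rw [hkeys]; exact PySem.Set.nodup_ofList _
  rw [PySem.Dict.items_eq_map_keys _ hnodup [], hkeys]
  apply List.map_congr_left
  intro k hk
  have hget : (pvN1 labels labels_array).get? k = some (pvFA labels k) := by
    rw [pvN1_eq_insFold]
    have h := pv_insFold_get (pvE1 labels labels_array).keys (pvFA labels) (pvN0 labels_array) k
    rw [h, if_pos (by rw [pvE1_keys]; exact hk)]
  rw [PySem.Dict.getD_eq_get?_getD, hget]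
  rfl

lemma pvFA_eq_pvVB (labels : List (List Int)) (k : Int) :
    pvFA labels k = pvVB labels (k, pvPtsFor k (pvCells labels)) := by
  unfold pvFA pvVB pvSentinel
  rw [pv_upd_fold]
  simp only [PySem.List.max?_id_cons, PySem.List.min?_id_cons, Option.getD_some, List.foldl_map]

lemma pvB_items (labels : List (List Int)) (labels_array : List Int) (hla : ¬ labels_array = []) :
    elongation_alt labels labels_array
      = (PySem.Set.ofList labels_array).map (fun k => (k, pvVB labels (k, pvPtsFor k (pvCells labels)))) := by
  rw [pvB_shape]
  have hne : ¬ (pvG1 labels labels_array).items.isEmpty = true := by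
    rw [List.isEmpty_iff, pvG1_items]
    intro hmap
    rcases List.exists_mem_of_ne_nil labels_array hla with ⟨x, hx⟩
    have : x ∈ PySem.Set.ofList labels_array := (PySem.Set.mem_ofList _ _).mpr hx
    rcases List.map_eq_nil_iff.mp hmap with h
    simp [h] at this
  rw [if_neg hne]
  have hfresh : ∀ kv ∈ (pvG1 labels labels_array).items,
      (PySem.Dict.empty : PySem.Dict Int (List Int)).contains kv.1 = false := by
    intro kv _; simp
  have hnod : ((pvG1 labels labels_array).items.map (·.1)).Nodup := by
    have : (pvG1 labels labels_array).items.map (·.1) = (pvG1 labels labels_array).keys := rfl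
    rw [this, pvG1_keys]
    exact PySem.Set.nodup_ofList _
  have hif := PySem.Dict.items_foldl_insert_fresh (pvG1 labels labels_array).items
    (fun kv => kv.1) (fun kv => pvVB labels kv) PySem.Dict.empty hfresh hnod
  rw [hif, pvG1_items, List.map_map]
  show ([] ++ _ : List (Int × List Int)) = _
  rw [List.nil_append]
  apply List.map_congr_left
  intro k _
  rfl

theorem pv_main (labels : List (List Int)) (labels_array : List Int) :
    elongation labels labels_array = elongation_alt labels labels_array := by
  by_cases hla : labels_array = []
  · subst hla
    rw [pvA_items, pvB_shape]
    have h0 : (pvG1 labels []).items = [] := by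
      rw [pvG1_items]; rfl
    rw [h0]
    rfl
  · rw [pvA_items, pvB_items labels labels_array hla]
    simp [pvFA_eq_pvVB]

-- ===== VERDICT (by name: the statement is the Claim_ definition above) =====
theorem elongation_spec : Claim_equal_elongation := by
  intro labels labels_array _ _
  unfold Spec_elongation
  exact pv_main labels labels_array
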